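-- pv_equiv track=rewrite | github.com/kimsy701/Video-Deinterlacing | etc/make_video_2.py | generate_start_frames_folders
-- ===== SOURCE A (Python) =====
-- def generate_start_frames_folders(ranges):
--     start_frames_folders = []
--     for start, end in ranges:
--         current = start
--         while current <= end:
--             if current % 50 == 0:
--                 start_frames_folders.append(current//50)
--             current += 50
--     return start_frames_folders
-- ===== SOURCE B (Python) =====
-- def generate_start_frames_folders(ranges):
--     # Closed-form: a stride-50 walk from start only ever hits multiples of 50
--     # when start itself is one; then the quotients are consecutive integers.
--     result = []
--     for start, end in ranges:
--         if start % 50 == 0: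
--             result.extend(range(start // 50, end // 50 + 1))
--     return result
-- ===== Notes on version B (the rewrite author's own statement) =====
-- stated objective: faster
-- what changed: Replaces the per-range stride-by-50 while-loop with per-iteration modulo tests by a single divisibility guard plus an arithmetic range of consecutive quotients.
import Mathlib
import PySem

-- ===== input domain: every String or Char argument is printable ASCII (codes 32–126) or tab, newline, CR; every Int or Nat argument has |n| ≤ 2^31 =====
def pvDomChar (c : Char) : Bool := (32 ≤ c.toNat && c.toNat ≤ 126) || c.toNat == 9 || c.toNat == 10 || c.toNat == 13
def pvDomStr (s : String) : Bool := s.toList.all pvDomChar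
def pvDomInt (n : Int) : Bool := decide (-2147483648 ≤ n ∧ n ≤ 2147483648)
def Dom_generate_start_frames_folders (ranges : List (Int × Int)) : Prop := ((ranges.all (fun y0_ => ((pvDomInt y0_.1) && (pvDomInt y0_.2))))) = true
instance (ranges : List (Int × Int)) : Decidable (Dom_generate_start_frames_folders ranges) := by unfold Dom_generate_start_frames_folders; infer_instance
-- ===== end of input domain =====

-- B replaces A's stride-by-50 while-loop (modulo test each step) by one divisibility
-- guard per range plus an arithmetic range of consecutive quotients (objective: faster
-- by a constant-factor mechanism: no per-50-step iteration or per-step modulo).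

-- ===== PORT A =====
-- the 'while current <= end' loop: appends current//50 when current % 50 == 0, steps by 50
def pvInnerA (current e : Int) : List Int :=
  if _h : current ≤ e then
    (if PySem.Int.mod current 50 = 0 then [PySem.Int.floordiv current 50] else [])
      ++ pvInnerA (current + 50) e
  else []
termination_by (e + 50 - current).toNat
decreasing_by omega

def generate_start_frames_folders (ranges : List (Int × Int)) : List Int :=
  ranges.foldl (fun acc p => acc ++ pvInnerA p.1 p.2) []

-- ===== PORT B =====
def generate_start_frames_folders_alt (ranges : List (Int × Int)) : List Int :=
  ranges.foldl (fun acc p =>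
    if PySem.Int.mod p.1 50 = 0 then
      acc ++ PySem.List.pyRange (PySem.Int.floordiv p.1 50) (PySem.Int.floordiv p.2 50 + 1) 1
    else acc) []

-- ===== PRECONDITION & SPEC =====
def Spec_generate_start_frames_folders (ranges : List (Int × Int)) (out : List Int) : Prop := out = generate_start_frames_folders_alt ranges
instance (ranges : List (Int × Int)) (out : List Int) : Decidable (Spec_generate_start_frames_folders ranges out) := by unfold Spec_generate_start_frames_folders; infer_instance

-- ===== CLAIM (what is proved, stated in full; the proofs are below) =====
def Claim_equal_generate_start_frames_folders : Prop := ∀ (ranges : List (Int × Int)), Dom_generate_start_frames_folders ranges → Spec_generate_start_frames_folders ranges (generate_start_frames_folders ranges)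

-- ===== LEMMAS AND PROOFS =====

-- if start is not a multiple of 50, no element of the 50-stride walk is
theorem pvInnerA_not_dvd (current e : Int) (h : PySem.Int.mod current 50 ≠ 0) :
    pvInnerA current e = [] := by
  fun_induction pvInnerA current e with
  | case1 c hle ih =>
      have hmod : PySem.Int.mod (c + 50) 50 = PySem.Int.mod c 50 := by
        rw [PySem.Int.mod_eq_emod_of_pos (by norm_num),
            PySem.Int.mod_eq_emod_of_pos (by norm_num)]
        omega
      rw [if_neg h, ih (by rw [hmod]; exact h)]
      rfl
  | case2 c hle => rfl

-- if start is a multiple of 50, the walk emits exactly the consecutive quotients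
theorem pvInnerA_dvd (current e : Int) (h : PySem.Int.mod current 50 = 0) :
    pvInnerA current e =
      PySem.List.pyRange (PySem.Int.floordiv current 50) (PySem.Int.floordiv e 50 + 1) 1 := by
  fun_induction pvInnerA current e with
  | case1 c hle ih =>
      have hmod : PySem.Int.mod (c + 50) 50 = 0 := by
        rw [PySem.Int.mod_eq_emod_of_pos (by norm_num)] at h ⊢; omega
      have hc : PySem.Int.floordiv c 50 * 50 = c := by
        have := PySem.Int.floordiv_mul_add_mod c 50
        omega
      have hfd : PySem.Int.floordiv (c + 50) 50 = PySem.Int.floordiv c 50 + 1 := by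
        rw [PySem.Int.floordiv_eq_iff_of_pos (by norm_num)]
        constructor <;> nlinarith
      have hlt : PySem.Int.floordiv c 50 < PySem.Int.floordiv e 50 + 1 := by
        have h1 : PySem.Int.floordiv c 50 ≤ PySem.Int.floordiv e 50 := by
          rw [PySem.Int.le_floordiv_iff_mul_le (by norm_num), hc]; exact hle
        omega
      rw [if_pos h, ih hmod, hfd, PySem.List.pyRange_one_cons hlt]
      rfl
  | case2 c hle =>
      have hc : PySem.Int.floordiv c 50 * 50 = c := by
        have := PySem.Int.floordiv_mul_add_mod c 50
        omega
      have hge : PySem.Int.floordiv e 50 + 1 ≤ PySem.Int.floordiv c 50 := by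
        by_contra hcon
        push Not at hcon
        have h1 : PySem.Int.floordiv c 50 ≤ PySem.Int.floordiv e 50 := by omega
        rw [PySem.Int.le_floordiv_iff_mul_le (by norm_num), hc] at h1
        exact hle h1
      rw [PySem.List.pyRange_one_eq_nil hge]

theorem pv_foldl_eq (ranges : List (Int × Int)) (acc : List Int) :
    ranges.foldl (fun acc p => acc ++ pvInnerA p.1 p.2) acc =
    ranges.foldl (fun acc p =>
      if PySem.Int.mod p.1 50 = 0 then
        acc ++ PySem.List.pyRange (PySem.Int.floordiv p.1 50) (PySem.Int.floordiv p.2 50 + 1) 1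
      else acc) acc := by
  induction ranges generalizing acc with
  | nil => rfl
  | cons p t ih =>
      simp only [List.foldl_cons]
      rw [ih]
      by_cases h : PySem.Int.mod p.1 50 = 0
      · rw [if_pos h, pvInnerA_dvd _ _ h]
      · rw [if_neg h, pvInnerA_not_dvd _ _ h, List.append_nil]

-- ===== VERDICT (by name: the statement is the Claim_ definition above) =====
theorem generate_start_frames_folders_spec : Claim_equal_generate_start_frames_folders := by
  intro ranges _
  unfold Spec_generate_start_frames_folders generate_start_frames_folders generate_start_frames_folders_alt
  exact pv_foldl_eq ranges []
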